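-- pv_equiv track=rewrite | github.com/nasailja/pamhd | miscellaneous/ccmc/get_plot.py | get_plot_quantities
-- ===== SOURCE A (Python) =====
-- def get_plot_quantities(the_page):
-- 	opt_started = False
-- 	quantities = dict()
-- 	selected = None
-- 	for line in the_page:
-- 		line = line.lower()
-- 		if '<select name="quantity1">' in line:
-- 			opt_started = True
-- 		if opt_started and '/select' in line:
-- 			opt_started = False
-- 			break
-- 		if opt_started and 'option' in line and 'value' in line:
-- 			# name presented to user
-- 			qty = line.split('value=')[1].split('>')[1].split('<')[0].strip()
-- 			# html code of above selection
-- 			value = line.split('value=')[1].split('>')[0].strip()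
-- 			quantities[qty] = value
-- 			if 'selected' in line:
-- 				selected = qty
--
-- 	return selected, quantities
-- ===== SOURCE B (Python) =====
-- def _region_before_close(lines):
-- 	# everything up to (excluding) the first line containing '/select'
-- 	region = []
-- 	for line in lines:
-- 		if '/select' in line:
-- 			break
-- 		region.append(line)
-- 	return region
--
--
-- def get_plot_quantities(the_page):
-- 	# phase 1: locate the option region of the quantity1 <select>
-- 	lowered = [line.lower() for line in the_page]
-- 	i = 0
-- 	while i < len(lowered) and '<select name="quantity1">' not in lowered[i]:
-- 		i += 1
-- 	region = _region_before_close(lowered[i:])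
-- 	# phase 2: parse the region
-- 	selected = None
-- 	quantities = dict()
-- 	for line in region:
-- 		if 'option' in line and 'value' in line:
-- 			qty = line.split('value=')[1].split('>')[1].split('<')[0].strip()
-- 			value = line.split('value=')[1].split('>')[0].strip()
-- 			quantities[qty] = value
-- 			if 'selected' in line:
-- 				selected = qty
-- 	return selected, quantities
-- ===== Notes on version B (the rewrite author's own statement) =====
-- stated objective: simpler
-- what changed: Replaced the single flag-driven state machine with a two-phase locate-then-parse structure: first slice out the option region (drop lines until the <select name="quantity1"> line, take until the /select line), then run a plain parsing loop over that region.
import Mathlib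
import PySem

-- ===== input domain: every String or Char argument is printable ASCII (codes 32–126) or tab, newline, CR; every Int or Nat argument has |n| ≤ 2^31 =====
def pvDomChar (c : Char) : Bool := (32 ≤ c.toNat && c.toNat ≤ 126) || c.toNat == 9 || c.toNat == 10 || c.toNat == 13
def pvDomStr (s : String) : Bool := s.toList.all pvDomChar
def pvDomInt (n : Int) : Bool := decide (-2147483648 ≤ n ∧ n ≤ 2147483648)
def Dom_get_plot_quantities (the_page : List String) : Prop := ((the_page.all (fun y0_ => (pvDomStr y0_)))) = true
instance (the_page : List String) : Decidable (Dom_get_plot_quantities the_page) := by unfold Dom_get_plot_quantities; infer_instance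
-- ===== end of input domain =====

-- B changes the decomposition only (locate the region, then parse it) — same cost, no speed claim.
-- Where Python A raises IndexError (a region line with 'option' and 'value' but no parsable 'value=…>'),
-- both ports return the same harmless default; Pre_ excludes exactly those raising inputs.

-- ===== PORT A =====
-- shared parse expressions (identical text in both Pythons):
-- line.split('value=')[1]  (IndexError → Pre_ excludes; port defaults to "")
def pvSeg (line : String) : String :=
  (PySem.List.pyGet? ((PySem.Str.split? line "value=").getD []) 1).getD ""
-- line.split('value=')[1].split('>')[1].split('<')[0].strip()
def pvQty (line : String) : String :=
  PySem.Str.strip ((PySem.List.pyGet? ((PySem.Str.split? ((PySem.List.pyGet? ((PySem.Str.split? (pvSeg line) ">").getD []) 1).getD "") "<").getD []) 0).getD "")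
-- line.split('value=')[1].split('>')[0].strip()
def pvVal (line : String) : String :=
  PySem.Str.strip ((PySem.List.pyGet? ((PySem.Str.split? (pvSeg line) ">").getD []) 0).getD "")

-- A's flag-driven loop, state = (opt_started, selected, quantities)
def pvLoopA : List String → Bool → Option String → PySem.Dict String String →
    Option String × (List (String × String))
  | [], _, sel, q => (sel, q.items)
  | l :: rest, opt, sel, q =>
    let line := PySem.Str.lower l
    let opt := opt || PySem.Str.isIn "<select name=\"quantity1\">" line
    if opt && PySem.Str.isIn "/select" line then (sel, q.items)   -- break
    else if opt && PySem.Str.isIn "option" line && PySem.Str.isIn "value" line then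
      let qty := pvQty line
      let q := q.insert qty (pvVal line)
      let sel := if PySem.Str.isIn "selected" line then some qty else sel
      pvLoopA rest opt sel q
    else pvLoopA rest opt sel q

def get_plot_quantities (the_page : List String) : Option String × (List (String × String)) :=
  pvLoopA the_page false none PySem.Dict.empty

-- ===== PORT B =====
-- phase 1 helpers: drop lines until the <select> line, keep lines until the /select line
def pvDropToSelect : List String → List String
  | [] => []
  | l :: rest => if PySem.Str.isIn "<select name=\"quantity1\">" l then l :: rest else pvDropToSelect rest

def pvRegionBeforeClose : List String → List String
  | [] => []
  | l :: rest => if PySem.Str.isIn "/select" l then [] else l :: pvRegionBeforeClose rest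

-- phase 2: plain parsing loop over the region
def pvParseB : List String → Option String → PySem.Dict String String →
    Option String × (List (String × String))
  | [], sel, q => (sel, q.items)
  | line :: rest, sel, q =>
    if PySem.Str.isIn "option" line && PySem.Str.isIn "value" line then
      let qty := pvQty line
      let q := q.insert qty (pvVal line)
      let sel := if PySem.Str.isIn "selected" line then some qty else sel
      pvParseB rest sel q
    else pvParseB rest sel q

def get_plot_quantities_alt (the_page : List String) : Option String × (List (String × String)) :=
  let lowered := the_page.map PySem.Str.lower
  pvParseB (pvRegionBeforeClose (pvDropToSelect lowered)) none PySem.Dict.empty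

-- ===== PRECONDITION & SPEC =====
-- Pre_ excludes exactly the inputs where Python A raises IndexError: a line of the parsed region
-- (from the <select name="quantity1"> line up to the /select line) that contains 'option' and 'value'
-- but either lacks 'value=' or whose segment after 'value=' lacks '>'.
def Pre_get_plot_quantities (the_page : List String) : Prop :=
  ∀ line ∈ ((the_page.map PySem.Str.lower).dropWhile
      (fun l => !(PySem.Str.isIn "<select name=\"quantity1\">" l))).takeWhile
      (fun l => !(PySem.Str.isIn "/select" l)),
    (PySem.Str.isIn "option" line && PySem.Str.isIn "value" line) = true →
      PySem.Str.isIn "value=" line = true ∧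
      PySem.Str.isIn ">" ((PySem.List.pyGet? ((PySem.Str.split? line "value=").getD []) 1).getD "") = true
instance (the_page : List String) : Decidable (Pre_get_plot_quantities the_page) := by
  unfold Pre_get_plot_quantities; infer_instance

def pvWitness_get_plot_quantities : List String :=
  ["x", "<select name=\"quantity1\">", "<option value=q1 selected>n1</option>",
   "<option value=q2>n2</option>", "</select>"]

def Spec_get_plot_quantities (the_page : List String) (out : Option String × (List (String × String))) : Prop := out = get_plot_quantities_alt the_page
instance (the_page : List String) (out : Option String × (List (String × String))) : Decidable (Spec_get_plot_quantities the_page out) := by unfold Spec_get_plot_quantities; infer_instance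

-- ===== CLAIM (what is proved, stated in full; the proofs are below) =====
def Claim_equal_get_plot_quantities : Prop := ∀ (the_page : List String), Dom_get_plot_quantities the_page → Pre_get_plot_quantities the_page → Spec_get_plot_quantities the_page (get_plot_quantities the_page)

-- ===== LEMMAS AND PROOFS =====

-- once the flag is set, A's loop is B's parse of the region before the closing tag
theorem pvLoopA_true (page : List String) : ∀ (sel : Option String) (q : PySem.Dict String String),
    pvLoopA page true sel q = pvParseB (pvRegionBeforeClose (page.map PySem.Str.lower)) sel q := by
  induction page with
  | nil => intro sel q; rfl
  | cons l rest ih =>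
    intro sel q
    simp only [pvLoopA, pvRegionBeforeClose, List.map, Bool.true_or, Bool.true_and]
    by_cases h1 : PySem.Str.isIn "/select" (PySem.Str.lower l) = true
    · rw [if_pos h1, if_pos h1]; rfl
    · rw [if_neg h1, if_neg h1]
      simp only [pvParseB]
      by_cases h2 : (PySem.Str.isIn "option" (PySem.Str.lower l) && PySem.Str.isIn "value" (PySem.Str.lower l)) = true
      · rw [if_pos h2, if_pos h2]; exact ih _ _
      · rw [if_neg h2, if_neg h2]; exact ih _ _

-- before the flag is set, A's loop drops lines until the <select> line
theorem pvLoopA_false (page : List String) : ∀ (sel : Option String) (q : PySem.Dict String String),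
    pvLoopA page false sel q
      = pvParseB (pvRegionBeforeClose (pvDropToSelect (page.map PySem.Str.lower))) sel q := by
  induction page with
  | nil => intro sel q; rfl
  | cons l rest ih =>
    intro sel q
    simp only [pvLoopA, pvDropToSelect, List.map, Bool.false_or]
    by_cases hs : PySem.Str.isIn "<select name=\"quantity1\">" (PySem.Str.lower l) = true
    · rw [if_pos hs]
      simp only [pvRegionBeforeClose, hs, Bool.true_and]
      by_cases h1 : PySem.Str.isIn "/select" (PySem.Str.lower l) = true
      · rw [if_pos h1, if_pos h1]; rfl
      · rw [if_neg h1, if_neg h1]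
        simp only [pvParseB]
        by_cases h2 : (PySem.Str.isIn "option" (PySem.Str.lower l) && PySem.Str.isIn "value" (PySem.Str.lower l)) = true
        · rw [if_pos h2, if_pos h2]; exact pvLoopA_true rest _ _
        · rw [if_neg h2, if_neg h2]; exact pvLoopA_true rest _ _
    · rw [if_neg hs]
      have hs' : PySem.Str.isIn "<select name=\"quantity1\">" (PySem.Str.lower l) = false :=
        Bool.not_eq_true _ ▸ Bool.of_not_eq_true hs
      simp only [hs', Bool.false_and]
      rw [if_neg Bool.false_ne_true, if_neg Bool.false_ne_true]
      exact ih sel q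

-- ===== VERDICT (by name: the statement is the Claim_ definition above) =====
theorem get_plot_quantities_spec : Claim_equal_get_plot_quantities := by
  intro the_page _ _
  unfold Spec_get_plot_quantities get_plot_quantities get_plot_quantities_alt
  exact pvLoopA_false the_page none PySem.Dict.empty
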